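-- pv_equiv track=rewrite | github.com/tilthere/Machine-Learning | NBayer.py | getVocDict
-- ===== SOURCE A (Python) =====
-- def getVocDict(docList):
--      vocDict= {}
--      vocDict[docList[0][0]]=docList[0]
--      # concatenate all the docs by the categories
--      for i in range(1,len(docList)):
--          if docList[i][0] == docList[i-1][0]:
--              vocDict[docList[i][0]]+=(docList[i])  #Do not use append
--          else:
--              vocDict[docList[i][0]] = docList[i]
--      return vocDict
-- ===== SOURCE B (Python) =====
-- def getVocDict(docList):
--     # Phase 1: collapse consecutive same-category docs into runs [key, concatenated doc].
--     runs = []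
--     for d in docList:
--         if runs and runs[-1][0] == d[0]:
--             runs[-1][1] += d
--         else:
--             runs.append([d[0], list(d)])
--     # Phase 2: build the dict; a later run of the same category overwrites the earlier one.
--     vocDict = {}
--     for key, doc in runs:
--         vocDict[key] = doc
--     return vocDict
-- ===== Notes on version B (the rewrite author's own statement) =====
-- stated objective: simpler
-- what changed: B replaces A's single index loop (comparing docList[i][0] with docList[i-1][0] and writing straight into the dict with += / assignment) by a two-phase pass: first collapse consecutive same-category docs into a run list, then build the dict from the runs (later runs overwrite).
import Mathlib
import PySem

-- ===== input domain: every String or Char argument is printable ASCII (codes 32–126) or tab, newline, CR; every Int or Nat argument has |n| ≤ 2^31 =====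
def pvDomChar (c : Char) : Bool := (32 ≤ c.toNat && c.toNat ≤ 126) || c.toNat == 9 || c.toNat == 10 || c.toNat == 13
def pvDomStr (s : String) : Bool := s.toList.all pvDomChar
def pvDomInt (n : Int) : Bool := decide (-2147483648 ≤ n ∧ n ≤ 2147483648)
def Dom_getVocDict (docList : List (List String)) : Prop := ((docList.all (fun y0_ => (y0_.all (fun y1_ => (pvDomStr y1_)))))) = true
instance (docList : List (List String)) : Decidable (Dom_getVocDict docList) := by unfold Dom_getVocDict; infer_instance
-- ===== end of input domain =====

-- B groups consecutive same-category docs into a run list first, then builds the dict from the runs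
-- (objective: simpler two-phase decomposition; return value only — A mutates docList's inner lists in place via +=, B does not).

-- d[0] of a doc (default never used under Pre_, which requires nonempty docs)
def key0 (d : List String) : String := (PySem.List.pyGet? d 0).getD ""

-- ===== PORT A =====
def getVocDict (docList : List (List String)) : List (String × List String) :=
  let d0 := (PySem.List.pyGet? docList 0).getD []
  let voc0 : PySem.Dict String (List String) := PySem.Dict.empty.insert (key0 d0) d0
  ((PySem.List.pyRange 1 (docList.length : Int) 1).foldl (fun voc i =>
      let di := PySem.List.pyGetD docList i []
      let dp := PySem.List.pyGetD docList (i - 1) []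
      if key0 di == key0 dp then voc.modify (key0 di) [] (fun v => v ++ di)
      else voc.insert (key0 di) di) voc0).items

-- ===== PORT B =====
-- one step of B's run-building loop (runs[-1] merge or append)
def runStepB (runs : List (String × List String)) (d : List String) : List (String × List String) :=
  match runs.getLast? with
  | some last =>
      if last.1 == key0 d then runs.dropLast ++ [(last.1, last.2 ++ d)]
      else runs ++ [(key0 d, d)]
  | none => [(key0 d, d)]

def getVocDict_alt (docList : List (List String)) : List (String × List String) :=
  let runs := docList.foldl runStepB []
  (runs.foldl (fun voc p => voc.insert p.1 p.2)
      (PySem.Dict.empty : PySem.Dict String (List String))).items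

-- ===== PRECONDITION & SPEC =====
-- Pre_ excludes exactly the inputs where Python A raises IndexError: the empty list
-- (docList[0]; B returns the empty dict there) and lists containing an empty doc (docList[i][0]).
def Pre_getVocDict (docList : List (List String)) : Prop :=
  docList ≠ [] ∧ ∀ d ∈ docList, d ≠ []
instance (docList : List (List String)) : Decidable (Pre_getVocDict docList) := by
  unfold Pre_getVocDict; infer_instance

def pvWitness_getVocDict : List (List String) := [["a", "x"], ["a", "y"], ["b", "z"]]

def Spec_getVocDict (docList : List (List String)) (out : List (String × List String)) : Prop :=
  out = getVocDict_alt docList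
instance (docList : List (List String)) (out : List (String × List String)) :
    Decidable (Spec_getVocDict docList out) := by unfold Spec_getVocDict; infer_instance

-- ===== CLAIM (what is proved, stated in full; the proofs are below) =====
def Claim_equal_getVocDict : Prop := ∀ (docList : List (List String)), Dom_getVocDict docList →
  Pre_getVocDict docList → Spec_getVocDict docList (getVocDict docList)

-- ===== LEMMAS AND PROOFS =====

-- the body of A's loop, as a function of the list it reads
def bodyA (zs : List (List String)) (voc : PySem.Dict String (List String)) (i : Int) :
    PySem.Dict String (List String) :=
  let di := PySem.List.pyGetD zs i []
  let dp := PySem.List.pyGetD zs (i - 1) []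
  if key0 di == key0 dp then voc.modify (key0 di) [] (fun v => v ++ di)
  else voc.insert (key0 di) di

-- A's dict before .items, as a named function of the input
def Adict (xs : List (List String)) : PySem.Dict String (List String) :=
  let d0 := (PySem.List.pyGet? xs 0).getD []
  (PySem.List.pyRange 1 (xs.length : Int) 1).foldl (bodyA xs) (PySem.Dict.empty.insert (key0 d0) d0)

theorem getVocDict_eq_Adict (xs : List (List String)) : getVocDict xs = (Adict xs).items := rfl

-- B's runs and dict, named
def runsOf (xs : List (List String)) : List (String × List String) := xs.foldl runStepB []
def dictFold (runs : List (String × List String)) : PySem.Dict String (List String) :=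
  runs.foldl (fun voc p => voc.insert p.1 p.2) PySem.Dict.empty

theorem getVocDict_alt_eq (xs : List (List String)) :
    getVocDict_alt xs = (dictFold (runsOf xs)).items := rfl

theorem sbeq_comm (a b : String) : (a == b) = (b == a) := by
  by_cases h : a = b
  · subst h; rfl
  · simp [h, Ne.symm h]

theorem dictFold_append_singleton (pre : List (String × List String)) (k : String)
    (v : List String) : dictFold (pre ++ [(k, v)]) = (dictFold pre).insert k v := by
  simp [dictFold, List.foldl_append]

theorem modify_eq_insert (d : PySem.Dict String (List String)) (k : String)
    (dflt : List String) (f : List String → List String) :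
    d.modify k dflt f = d.insert k (f (d.getD k dflt)) := by
  simp [PySem.Dict.modify]

theorem bodyA_snoc_congr (xs : List (List String)) (y : List String)
    (init : PySem.Dict String (List String)) :
    (PySem.List.pyRange 1 (xs.length : Int) 1).foldl (bodyA (xs ++ [y])) init =
    (PySem.List.pyRange 1 (xs.length : Int) 1).foldl (bodyA xs) init := by
  apply PySem.List.foldl_congr_mem
  intro acc i hi
  rw [PySem.List.mem_pyRange_one] at hi
  have e1 : PySem.List.pyGetD (xs ++ [y]) i [] = PySem.List.pyGetD xs i [] := by
    rw [PySem.List.pyGetD_eq_getElem _ _ (by omega)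
          (by simp only [List.length_append, List.length_cons, List.length_nil]; push_cast; omega),
        PySem.List.pyGetD_eq_getElem _ _ (by omega) hi.2,
        List.getElem_append_left]
  have e2 : PySem.List.pyGetD (xs ++ [y]) (i - 1) [] = PySem.List.pyGetD xs (i - 1) [] := by
    rw [PySem.List.pyGetD_eq_getElem _ _ (by omega)
          (by simp only [List.length_append, List.length_cons, List.length_nil]; push_cast; omega),
        PySem.List.pyGetD_eq_getElem _ _ (by omega) (by omega),
        List.getElem_append_left]
  simp only [bodyA, e1, e2]

-- A's snoc step, for nonempty xs
theorem Adict_snoc (xs : List (List String)) (y : List String) (hxs : xs ≠ []) :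
    Adict (xs ++ [y]) =
      (if key0 y == key0 (xs.getLast hxs)
       then (Adict xs).modify (key0 y) [] (fun v => v ++ y)
       else (Adict xs).insert (key0 y) y) := by
  have hn : 1 ≤ (xs.length : Int) := by
    have := List.length_pos_iff.mpr hxs; omega
  have h1 : PySem.List.pyGetD (xs ++ [y]) ((xs.length : Nat) : Int) [] = y := by
    rw [PySem.List.pyGetD_eq_getElem _ _ (by omega)
          (by simp only [List.length_append, List.length_cons, List.length_nil]; push_cast; omega)]
    simp
  have h2 : PySem.List.pyGetD (xs ++ [y]) (((xs.length : Nat) : Int) - 1) [] = xs.getLast hxs := by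
    rw [PySem.List.pyGetD_eq_getElem _ _ (by omega)
          (by simp only [List.length_append, List.length_cons, List.length_nil]; push_cast; omega),
        List.getElem_append_left (by omega)]
    have ht : (((xs.length : Nat) : Int) - 1).toNat = xs.length - 1 := by omega
    simp [ht, List.getLast_eq_getElem]
  unfold Adict
  have hlen : (((xs ++ [y]).length : Nat) : Int) = (xs.length : Int) + 1 := by simp
  rw [hlen, PySem.List.pyRange_one_succ_right hn, List.foldl_append, bodyA_snoc_congr]
  obtain ⟨x, t, rfl⟩ := List.exists_cons_of_ne_nil hxs
  rw [List.cons_append, PySem.List.pyGet?_zero_cons, PySem.List.pyGet?_zero_cons, ← List.cons_append]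
  simp only [List.foldl_cons, List.foldl_nil]
  show bodyA _ _ _ = _
  rw [bodyA, h1, h2]

-- the joint invariant, by reverse induction on the input
theorem runs_invariant (xs : List (List String)) (hxs : xs ≠ []) :
    ∃ (h : runsOf xs ≠ []),
      ((runsOf xs).getLast h).1 = key0 (xs.getLast hxs) ∧
      dictFold (runsOf xs) = Adict xs := by
  induction xs using List.reverseRecOn with
  | nil => exact absurd rfl hxs
  | append_singleton zs y ih =>
    by_cases hz : zs = []
    · subst hz
      refine ⟨by simp [runsOf, runStepB], ?_, ?_⟩
      · simp [runsOf, runStepB]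
      · simp [runsOf, runStepB, dictFold, Adict]
    · obtain ⟨h1, h2, h3⟩ := ih hz
      have hlast : (runsOf zs).getLast? = some ((runsOf zs).getLast h1) :=
        List.getLast?_eq_some_getLast h1
      have hfold : runsOf (zs ++ [y]) = runStepB (runsOf zs) y := by
        simp only [runsOf, List.foldl_append, List.foldl_cons, List.foldl_nil]
      by_cases hk : (((runsOf zs).getLast h1).1 == key0 y) = true
      · -- same category: merge into the last run
        have hruns : runsOf (zs ++ [y]) =
            (runsOf zs).dropLast ++ [(((runsOf zs).getLast h1).1, ((runsOf zs).getLast h1).2 ++ y)] := by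
          rw [hfold]
          simp only [runStepB, hlast]
          simp [hk]
        have hkey : key0 y = ((runsOf zs).getLast h1).1 := (eq_of_beq hk).symm
        have hcond : (key0 y == key0 (zs.getLast hz)) = true := by
          rw [← h2, hkey]; simp
        have hAd : Adict (zs ++ [y]) = (Adict zs).modify (key0 y) [] (fun v => v ++ y) := by
          rw [Adict_snoc zs y hz, if_pos hcond]
        have hsplit : (runsOf zs).dropLast ++ [(runsOf zs).getLast h1] = runsOf zs :=
          List.dropLast_append_getLast h1
        refine ⟨by simp [hruns], ?_, ?_⟩
        · simp [hruns, ← hkey]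
        · rw [hruns, dictFold_append_singleton, hAd, ← h3]
          conv_rhs => rw [← hsplit]
          rw [dictFold_append_singleton, hkey, modify_eq_insert,
              PySem.Dict.getD_insert_self, PySem.Dict.insert_insert_self]
      · -- new category: append a fresh run
        have hruns : runsOf (zs ++ [y]) = runsOf zs ++ [(key0 y, y)] := by
          rw [hfold]
          simp only [runStepB, hlast]
          simp [hk]
        have hcond : (key0 y == key0 (zs.getLast hz)) = false := by
          rw [← h2, sbeq_comm]
          simpa using hk
        refine ⟨by simp [hruns], ?_, ?_⟩
        · simp [hruns]
        · rw [hruns, dictFold_append_singleton, h3, Adict_snoc zs y hz, if_neg (by simp [hcond])]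

-- ===== VERDICT (by name: the statement is the Claim_ definition above) =====
theorem getVocDict_spec : Claim_equal_getVocDict := by
  intro docList _ hpre
  unfold Spec_getVocDict
  obtain ⟨hne, -⟩ := hpre
  obtain ⟨h1, -, h3⟩ := runs_invariant docList hne
  rw [getVocDict_eq_Adict, getVocDict_alt_eq, h3]
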